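-- pv_equiv track=rewrite | github.com/OpenHistoricalMap/ohm-deploy | images/tiler-cache/utils/varnish_purger.py | _expand_tile_prefixes
-- ===== SOURCE A (Python) =====
-- from typing import Iterable, List, Set
--
-- def _tile_to_prefix(z: int, x: int) -> str:
--     """Return a z/x_prefix truncated like the S3 cleaner does.
--
--     x_str <= 2 chars: keep as-is ; 3 chars: drop last ; 4+ chars: drop last 2.
--     """
--     x_str = str(x)
--     if len(x_str) <= 2:
--         return f"{z}/{x_str}"
--     if len(x_str) == 3:
--         return f"{z}/{x_str[:-1]}"
--     return f"{z}/{x_str[:-2]}"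
--
-- def _prefixes_for_x_range(z: int, x_lo: int, x_hi: int) -> Set[str]:
--     """Unique z/x_prefix strings for x in [x_lo, x_hi].
--
--     Walks x by jumping to the next x that would change the truncated prefix,
--     so the work scales with the number of prefixes, not the width of the range.
--     """
--     out: Set[str] = set()
--     x = x_lo
--     while x <= x_hi:
--         out.add(_tile_to_prefix(z, x))
--         s = str(x)
--         if len(s) <= 2:
--             x += 1
--         elif len(s) == 3:
--             x = (x // 10 + 1) * 10
--         else:
--             x = (x // 100 + 1) * 100
--     return out
--
-- def _expand_tile_prefixes(z: int, x: int, zoom_levels: Iterable[int]) -> Set[str]: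
--     """Expand a tile to z/x_prefix strings for parents + same zoom + children.
--
--     Children expansion is bounded by max(zoom_levels) — the caller-supplied
--     list is the authoritative range. Prefixes at each child zoom are generated
--     directly from the x-range instead of iterating every child tile.
--     """
--     zooms = set(zoom_levels)
--     if not zooms:
--         return set()
--     zmin, zmax = min(zooms), max(zooms)
--     out: Set[str] = set()
--
--     if z in zooms:
--         out.add(_tile_to_prefix(z, x))
--
--     px = x
--     for pz in range(z - 1, zmin - 1, -1):
--         px //= 2
--         if pz in zooms:
--             out.add(_tile_to_prefix(pz, px))
--
--     for cz in range(z + 1, zmax + 1):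
--         if cz not in zooms:
--             continue
--         factor = 2 ** (cz - z)
--         x_lo = x * factor
--         x_hi = x_lo + factor - 1
--         out.update(_prefixes_for_x_range(cz, x_lo, x_hi))
--
--     return out
-- ===== SOURCE B (Python) =====
-- def _tile_to_prefix(z: int, x: int) -> str:
--     x_str = str(x)
--     if len(x_str) <= 2:
--         return f"{z}/{x_str}"
--     if len(x_str) == 3:
--         return f"{z}/{x_str[:-1]}"
--     return f"{z}/{x_str[:-2]}"
--
-- def _expand_tile_prefixes(z, x, zoom_levels):
--     """Same result as A on x >= 0; children are enumerated tile by tile."""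
--     zooms = set(zoom_levels)
--     if not zooms:
--         return set()
--     zmin, zmax = min(zooms), max(zooms)
--     out = set()
--     if z in zooms:
--         out.add(_tile_to_prefix(z, x))
--     for pz in range(z - 1, zmin - 1, -1):
--         if pz in zooms:
--             out.add(_tile_to_prefix(pz, x // 2 ** (z - pz)))
--     for cz in range(z + 1, zmax + 1):
--         if cz in zooms:
--             span = 2 ** (cz - z)
--             for cx in range(x * span, x * span + span):
--                 out.add(_tile_to_prefix(cz, cx))
--     return out
-- ===== Notes on version B (the rewrite author's own statement) =====
-- stated objective: alternative
-- what changed: Children prefixes are produced by enumerating every child tile x in the range instead of A's digit-boundary jump walk, and each parent x is computed by the closed form x // 2**(z - pz) instead of threading a running px accumulator.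
-- outside the precondition, e.g. on _expand_tile_prefixes(0, -3, [2]): A returns {'2/-1'}, B returns {'2/-9', '2/-1'}
import Mathlib
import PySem

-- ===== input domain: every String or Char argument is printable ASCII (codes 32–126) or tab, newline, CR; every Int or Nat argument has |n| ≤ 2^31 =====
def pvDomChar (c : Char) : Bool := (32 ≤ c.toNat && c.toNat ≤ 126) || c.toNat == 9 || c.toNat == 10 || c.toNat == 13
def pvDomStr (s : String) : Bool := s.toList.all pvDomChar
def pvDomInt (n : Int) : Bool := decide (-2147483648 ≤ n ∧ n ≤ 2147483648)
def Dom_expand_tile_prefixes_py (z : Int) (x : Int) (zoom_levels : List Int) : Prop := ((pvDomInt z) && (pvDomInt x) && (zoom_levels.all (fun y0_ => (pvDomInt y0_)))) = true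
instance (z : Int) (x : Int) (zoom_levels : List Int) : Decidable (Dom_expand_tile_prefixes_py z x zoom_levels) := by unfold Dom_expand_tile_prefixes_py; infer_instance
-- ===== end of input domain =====

-- B replaces A's digit-boundary jump walk over each child x-range by a plain enumeration of
-- every child tile, and computes each parent x by the closed form x // 2**(z - pz) instead of
-- threading a running accumulator (objective: alternative decomposition, not faster).

-- ===== PORT A =====
-- _tile_to_prefix (shared helper of both Python files; f-strings ported as list-append of the pieces, exact for str of ints)
def pvTileToPrefix (z : Int) (x : Int) : String :=
  let x_str := PySem.Int.toChars x
  if x_str.length ≤ 2 then String.ofList (PySem.Int.toChars z ++ '/' :: x_str)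
  else if x_str.length = 3 then String.ofList (PySem.Int.toChars z ++ '/' :: PySem.List.slice x_str none (some (-1)))
  else String.ofList (PySem.Int.toChars z ++ '/' :: PySem.List.slice x_str none (some (-2)))

-- the next x of A's while loop in _prefixes_for_x_range (the three reassignments of x)
def pvJump (x : Int) : Int :=
  let s := PySem.Int.toChars x
  if s.length ≤ 2 then x + 1
  else if s.length = 3 then (PySem.Int.floordiv x 10 + 1) * 10
  else (PySem.Int.floordiv x 100 + 1) * 100

-- termination of the while loop: x strictly increases
theorem pvJump_gt (x : Int) : x < pvJump x := by
  have h10 : PySem.Int.floordiv x 10 = x / 10 := PySem.Int.floordiv_eq_ediv_of_pos (by norm_num)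
  have h100 : PySem.Int.floordiv x 100 = x / 100 := PySem.Int.floordiv_eq_ediv_of_pos (by norm_num)
  simp only [pvJump]
  split_ifs with h1 h2
  · omega
  · rw [h10]; omega
  · rw [h100]; omega

-- _prefixes_for_x_range: the while loop, state (x, out)
def pvPrefWalk (cz : Int) (x_hi : Int) (x : Int) (out : PySem.Set String) : PySem.Set String :=
  if _h : x ≤ x_hi then
    pvPrefWalk cz x_hi (pvJump x) (PySem.Set.add out (pvTileToPrefix cz x))
  else out
termination_by (x_hi + 1 - x).toNat
decreasing_by have := pvJump_gt x; omega

def expand_tile_prefixes_py (z : Int) (x : Int) (zoom_levels : List Int) : List String :=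
  let zooms : PySem.Set Int := PySem.Set.ofList zoom_levels
  if zooms = [] then []
  else
    -- min(zooms)/max(zooms): set is nonempty here, so the getD default is never used
    let zmin := ((PySem.List.min? zooms id).getD 0)
    let zmax := ((PySem.List.max? zooms id).getD 0)
    let out0 : PySem.Set String :=
      if PySem.Set.contains zooms z then PySem.Set.add PySem.Set.empty (pvTileToPrefix z x)
      else PySem.Set.empty
    let pres := (PySem.List.pyRange (z - 1) (zmin - 1) (-1)).foldl
      (fun (st : Int × PySem.Set String) pz =>
        let px := PySem.Int.floordiv st.1 2
        (px, if PySem.Set.contains zooms pz then PySem.Set.add st.2 (pvTileToPrefix pz px) else st.2))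
      (x, out0)
    (PySem.List.pyRange (z + 1) (zmax + 1) 1).foldl
      (fun out cz =>
        if PySem.Set.contains zooms cz then
          -- 2 ** (cz - z); cz - z ≥ 1 inside this range, so .toNat is exact
          let factor : Int := (2 : Int) ^ (cz - z).toNat
          let x_lo := x * factor
          let x_hi := x_lo + factor - 1
          PySem.Set.update out (pvPrefWalk cz x_hi x_lo PySem.Set.empty)
        else out)
      pres.2

-- ===== PORT B =====
def expand_tile_prefixes_py_alt (z : Int) (x : Int) (zoom_levels : List Int) : List String :=
  let zooms : PySem.Set Int := PySem.Set.ofList zoom_levels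
  if zooms = [] then []
  else
    let zmin := ((PySem.List.min? zooms id).getD 0)
    let zmax := ((PySem.List.max? zooms id).getD 0)
    let out0 : PySem.Set String :=
      if PySem.Set.contains zooms z then PySem.Set.add PySem.Set.empty (pvTileToPrefix z x)
      else PySem.Set.empty
    let pres := (PySem.List.pyRange (z - 1) (zmin - 1) (-1)).foldl
      (fun out pz =>
        if PySem.Set.contains zooms pz then
          PySem.Set.add out (pvTileToPrefix pz (PySem.Int.floordiv x ((2 : Int) ^ (z - pz).toNat)))
        else out)
      out0
    (PySem.List.pyRange (z + 1) (zmax + 1) 1).foldl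
      (fun out cz =>
        if PySem.Set.contains zooms cz then
          let span : Int := (2 : Int) ^ (cz - z).toNat
          (PySem.List.pyRange (x * span) (x * span + span) 1).foldl
            (fun out cx => PySem.Set.add out (pvTileToPrefix cz cx)) out
        else out)
      pres

-- ===== PRECONDITION & SPEC =====
-- Pre_ restricts to the natural tile domain x ≥ 0: on negative x (never a valid tile
-- column) A's digit-string jump walk skips prefixes of negative child ranges, an
-- artefact of its implementation that B does not reproduce.
def Pre_expand_tile_prefixes_py (z : Int) (x : Int) (zoom_levels : List Int) : Prop := 0 ≤ x
instance (z : Int) (x : Int) (zoom_levels : List Int) : Decidable (Pre_expand_tile_prefixes_py z x zoom_levels) := by unfold Pre_expand_tile_prefixes_py; infer_instance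
def pvWitness_expand_tile_prefixes_py : Int × Int × List Int := (2, 3, [1, 2, 3])

def Spec_expand_tile_prefixes_py (z : Int) (x : Int) (zoom_levels : List Int) (out : List String) : Prop := out = expand_tile_prefixes_py_alt z x zoom_levels
instance (z : Int) (x : Int) (zoom_levels : List Int) (out : List String) : Decidable (Spec_expand_tile_prefixes_py z x zoom_levels out) := by unfold Spec_expand_tile_prefixes_py; infer_instance

-- ===== CLAIM (what is proved, stated in full; the proofs are below) =====
def Claim_equal_expand_tile_prefixes_py : Prop := ∀ (z : Int) (x : Int) (zoom_levels : List Int), Dom_expand_tile_prefixes_py z x zoom_levels → Pre_expand_tile_prefixes_py z x zoom_levels → Spec_expand_tile_prefixes_py z x zoom_levels (expand_tile_prefixes_py z x zoom_levels)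

-- ===== LEMMAS AND PROOFS =====

-- ---- decimal-representation facts about Nat.toDigits 10 ----
theorem pvTdAcc (b : Nat) : ∀ (f n : Nat) (l : List Char),
    Nat.toDigitsCore b f n l = Nat.toDigitsCore b f n [] ++ l := by
  intro f
  induction f with
  | zero => intro n l; simp [Nat.toDigitsCore]
  | succ f ih =>
    intro n l
    simp only [Nat.toDigitsCore]
    by_cases h : n / b = 0
    · simp [h]
    · simp only [h, if_false]
      rw [ih (n / b) (Nat.digitChar (n % b) :: l), ih (n / b) [Nat.digitChar (n % b)]]
      simp

theorem pvTdCoreSucc (b f n : Nat) (l : List Char) :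
    Nat.toDigitsCore b (f + 1) n l
      = if n / b = 0 then Nat.digitChar (n % b) :: l
        else Nat.toDigitsCore b f (n / b) (Nat.digitChar (n % b) :: l) := rfl

theorem pvTdFuel : ∀ (n f : Nat), n < f →
    Nat.toDigitsCore 10 f n [] = Nat.toDigits 10 n := by
  intro n
  induction n using Nat.strong_induction_on with
  | _ n ih =>
    intro f hf
    match f, hf with
    | f + 1, _ =>
      rw [Nat.toDigits, pvTdCoreSucc, pvTdCoreSucc]
      by_cases h : n / 10 = 0
      · simp [h]
      · simp only [h, if_false]
        have hn : 10 ≤ n := by omega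
        have hlt : n / 10 < n := by omega
        rw [pvTdAcc 10 f, pvTdAcc 10 n]
        rw [ih (n / 10) hlt f (by omega), ih (n / 10) hlt n (by omega)]

theorem pvTdStep {m : Nat} (h : 10 ≤ m) :
    Nat.toDigits 10 m = Nat.toDigits 10 (m / 10) ++ [Nat.digitChar (m % 10)] := by
  have hm : ¬ m / 10 = 0 := by omega
  match m, h with
  | m + 10, _ =>
    rw [Nat.toDigits, pvTdCoreSucc]
    simp only [hm, if_false]
    rw [pvTdAcc]
    rw [pvTdFuel ((m + 10) / 10) (m + 10) (by omega)]

theorem pvTdLen1 {m : Nat} (h : m < 10) : (Nat.toDigits 10 m).length = 1 := by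
  have h0 : m / 10 = 0 := by omega
  rw [Nat.toDigits, pvTdCoreSucc]
  simp [h0]

theorem pvTdLen2 {m : Nat} (h1 : 10 ≤ m) (h2 : m < 100) : (Nat.toDigits 10 m).length = 2 := by
  rw [pvTdStep h1]
  simp [pvTdLen1 (show m / 10 < 10 by omega)]

theorem pvTdLen3 {m : Nat} (h1 : 100 ≤ m) (h2 : m < 1000) : (Nat.toDigits 10 m).length = 3 := by
  rw [pvTdStep (by omega : 10 ≤ m)]
  simp [pvTdLen2 (show 10 ≤ m / 10 by omega) (show m / 10 < 100 by omega)]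

theorem pvTdPos (m : Nat) : 1 ≤ (Nat.toDigits 10 m).length := by
  by_cases h : m < 10
  · simp [pvTdLen1 h]
  · rw [pvTdStep (by omega)]; simp

theorem pvTdLen4 {m : Nat} (h : 1000 ≤ m) : 4 ≤ (Nat.toDigits 10 m).length := by
  rw [pvTdStep (by omega : 10 ≤ m), pvTdStep (show 10 ≤ m / 10 by omega),
      pvTdStep (show 10 ≤ m / 10 / 10 by omega)]
  have := pvTdPos (m / 10 / 10 / 10)
  simp
  omega

theorem pvToCharsNonneg {n : Int} (h : 0 ≤ n) :
    PySem.Int.toChars n = Nat.toDigits 10 n.toNat := by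
  simp [PySem.Int.toChars, not_lt.mpr h]

-- prefixes are constant on each block [x, pvJump x) (for nonnegative x)
theorem pvPrefConst (cz : Int) {lo y : Int} (h0 : 0 ≤ lo) (h1 : lo ≤ y) (h2 : y < pvJump lo) :
    pvTileToPrefix cz y = pvTileToPrefix cz lo := by
  have hy0 : 0 ≤ y := le_trans h0 h1
  have hlo := pvToCharsNonneg h0
  have hy := pvToCharsNonneg hy0
  have hd10 : PySem.Int.floordiv lo 10 = lo / 10 := PySem.Int.floordiv_eq_ediv_of_pos (by norm_num)
  have hd100 : PySem.Int.floordiv lo 100 = lo / 100 := PySem.Int.floordiv_eq_ediv_of_pos (by norm_num)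
  by_cases hA : lo ≤ 99
  · -- 1–2 digit block: the jump is x + 1, so y = lo
    have hlenlo : (PySem.Int.toChars lo).length ≤ 2 := by
      rw [hlo]
      by_cases h9 : lo ≤ 9
      · rw [pvTdLen1 (show lo.toNat < 10 by omega)]; norm_num
      · rw [pvTdLen2 (show 10 ≤ lo.toNat by omega) (show lo.toNat < 100 by omega)]
    have hj : pvJump lo = lo + 1 := by simp only [pvJump]; rw [if_pos hlenlo]
    have : y = lo := by omega
    rw [this]
  · by_cases hB : lo ≤ 999
    · -- 3-digit block: prefix is str(v // 10)
      have hlenlo : (PySem.Int.toChars lo).length = 3 := by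
        rw [hlo, pvTdLen3 (show 100 ≤ lo.toNat by omega) (show lo.toNat < 1000 by omega)]
      have hj : pvJump lo = (lo / 10 + 1) * 10 := by
        simp only [pvJump]
        rw [if_neg (by omega), if_pos hlenlo, hd10]
      rw [hj] at h2
      have hyr : 100 ≤ y ∧ y ≤ 999 := by omega
      have hleny : (PySem.Int.toChars y).length = 3 := by
        rw [hy, pvTdLen3 (show 100 ≤ y.toNat by omega) (show y.toNat < 1000 by omega)]
      simp only [pvTileToPrefix, hleny, hlenlo]
      norm_num
      rw [PySem.List.slice_to_neg_one, PySem.List.slice_to_neg_one, hy, hlo,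
          pvTdStep (show 10 ≤ y.toNat by omega), pvTdStep (show 10 ≤ lo.toNat by omega),
          List.dropLast_concat, List.dropLast_concat,
          show y.toNat / 10 = lo.toNat / 10 by omega]
    · -- 4+-digit block: prefix is str(v // 100)
      have hlenlo : 4 ≤ (PySem.Int.toChars lo).length := by
        rw [hlo]; exact pvTdLen4 (by omega)
      have hj : pvJump lo = (lo / 100 + 1) * 100 := by
        simp only [pvJump]
        rw [if_neg (by omega), if_neg (by omega), hd100]
      rw [hj] at h2
      have hleny : 4 ≤ (PySem.Int.toChars y).length := by
        rw [hy]; exact pvTdLen4 (by omega)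
      simp only [pvTileToPrefix]
      rw [if_neg (by omega), if_neg (by omega), if_neg (by omega), if_neg (by omega)]
      rw [PySem.List.slice_to_neg_ofNat _ 2 (by norm_num), PySem.List.slice_to_neg_ofNat _ 2 (by norm_num)]
      rw [hy, hlo, pvTdStep (show 10 ≤ y.toNat by omega), pvTdStep (show 10 ≤ lo.toNat by omega),
          pvTdStep (show 10 ≤ y.toNat / 10 by omega), pvTdStep (show 10 ≤ lo.toNat / 10 by omega)]
      rw [List.append_assoc, List.append_assoc]
      rw [List.length_append, List.length_append]
      rw [List.take_left' (by simp), List.take_left' (by simp)]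
      rw [show y.toNat / 10 / 10 = lo.toNat / 10 / 10 by omega]

-- ---- the jump walk as a fold over its visited x's ----
def pvVisited (x_hi : Int) (x : Int) : List Int :=
  if _h : x ≤ x_hi then x :: pvVisited x_hi (pvJump x) else []
termination_by (x_hi + 1 - x).toNat
decreasing_by have := pvJump_gt x; omega

theorem pvWalkEqFold (cz x_hi : Int) : ∀ (x : Int) (out : PySem.Set String),
    pvPrefWalk cz x_hi x out
      = (pvVisited x_hi x).foldl (fun o y => PySem.Set.add o (pvTileToPrefix cz y)) out := by
  suffices h : ∀ (n : Nat) (x : Int), (x_hi + 1 - x).toNat = n → ∀ out,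
      pvPrefWalk cz x_hi x out
        = (pvVisited x_hi x).foldl (fun o y => PySem.Set.add o (pvTileToPrefix cz y)) out by
    intro x out; exact h _ x rfl out
  intro n
  induction n using Nat.strong_induction_on with
  | _ n ih =>
    intro x hm out
    rw [pvPrefWalk, pvVisited]
    by_cases h : x ≤ x_hi
    · rw [dif_pos h, dif_pos h, List.foldl_cons]
      have := pvJump_gt x
      exact ih _ (by omega) (pvJump x) rfl _
    · rw [dif_neg h, dif_neg h, List.foldl_nil]

theorem pvDiscardConsSelf {α : Type} [BEq α] [LawfulBEq α] (t : PySem.Set α) (c : α) :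
    PySem.Set.discard (c :: t) c = PySem.Set.discard t c := by
  simp [PySem.Set.discard]

theorem pvDiscardDiscardSelf {α : Type} [BEq α] [LawfulBEq α] (t : PySem.Set α) (c : α) :
    PySem.Set.discard (PySem.Set.discard t c) c = PySem.Set.discard t c := by
  simp [PySem.Set.discard, List.filter_filter]

theorem pvOfListAppendConst {α : Type} [BEq α] [LawfulBEq α] (c : α) :
    ∀ (M1 M2 : List α), M1 ≠ [] → (∀ m ∈ M1, m = c) →
    PySem.Set.ofList (M1 ++ M2) = PySem.Set.ofList (c :: M2) := by
  intro M1
  induction M1 with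
  | nil => intro M2 hne _; cases hne rfl
  | cons a M1' ih =>
    intro M2 _ hall
    have ha : a = c := hall a (by simp)
    subst ha
    by_cases h1 : M1' = []
    · subst h1; simp
    · rw [List.cons_append, PySem.Set.ofList_cons,
          ih M2 h1 (fun m hm => hall m (by simp [hm]))]
      rw [PySem.Set.ofList_cons, pvDiscardConsSelf, pvDiscardDiscardSelf]

theorem pvVisitedOfList (cz x_hi : Int) : ∀ (lo : Int), 0 ≤ lo →
    PySem.Set.ofList ((pvVisited x_hi lo).map (pvTileToPrefix cz))
      = PySem.Set.ofList ((PySem.List.pyRange lo (x_hi + 1) 1).map (pvTileToPrefix cz)) := by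
  suffices h : ∀ (n : Nat) (lo : Int), (x_hi + 1 - lo).toNat = n → 0 ≤ lo →
      PySem.Set.ofList ((pvVisited x_hi lo).map (pvTileToPrefix cz))
        = PySem.Set.ofList ((PySem.List.pyRange lo (x_hi + 1) 1).map (pvTileToPrefix cz)) by
    intro lo h0; exact h _ lo rfl h0
  intro n
  induction n using Nat.strong_induction_on with
  | _ n ih =>
    intro lo hm h0
    rw [pvVisited]
    by_cases h : lo ≤ x_hi
    · rw [dif_pos h]
      have hj := pvJump_gt lo
      have hall : ∀ m ∈ (PySem.List.pyRange lo (pvJump lo) 1).map (pvTileToPrefix cz),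
          m = pvTileToPrefix cz lo := by
        intro m hmm
        rcases List.mem_map.mp hmm with ⟨y, hy, rfl⟩
        rcases PySem.List.mem_pyRange_one.mp hy with ⟨hy1, hy2⟩
        exact pvPrefConst cz h0 hy1 hy2
      by_cases hcase : pvJump lo ≤ x_hi
      · rw [PySem.List.pyRange_one_append lo (pvJump lo) (x_hi + 1) (le_of_lt hj) (by omega),
            List.map_append, List.map_cons,
            pvOfListAppendConst (pvTileToPrefix cz lo) _ _
              (by rw [PySem.List.pyRange_one_cons hj]; simp) hall,
            PySem.Set.ofList_cons, PySem.Set.ofList_cons,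
            ih _ (by omega) (pvJump lo) rfl (by omega)]
      · rw [pvVisited, dif_neg hcase, List.map_cons, List.map_nil]
        have heq : (PySem.List.pyRange lo (x_hi + 1) 1).map (pvTileToPrefix cz)
            = ((PySem.List.pyRange lo (x_hi + 1) 1).map (pvTileToPrefix cz)) ++ [] := by simp
        rw [heq, pvOfListAppendConst (pvTileToPrefix cz lo) _ _
              (by rw [PySem.List.pyRange_one_cons (by omega : lo < x_hi + 1)]; simp)
              (fun m hmm => by
                rcases List.mem_map.mp hmm with ⟨y, hy, rfl⟩
                rcases PySem.List.mem_pyRange_one.mp hy with ⟨hy1, hy2⟩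
                exact pvPrefConst cz h0 hy1 (by omega))]
    · rw [dif_neg h, PySem.List.pyRange_one_eq_nil (by omega)]

-- per child zoom: A's update-with-jump-walk equals B's full-range fold
theorem pvChildEq (cz lo x_hi : Int) (h0 : 0 ≤ lo) (out : PySem.Set String) :
    PySem.Set.update out (pvPrefWalk cz x_hi lo PySem.Set.empty)
      = (PySem.List.pyRange lo (x_hi + 1) 1).foldl
          (fun o cx => PySem.Set.add o (pvTileToPrefix cz cx)) out := by
  rw [pvWalkEqFold,
      ← PySem.Set.update_map_eq_foldl_add (pvVisited x_hi lo) (pvTileToPrefix cz) PySem.Set.empty,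
      PySem.Set.update_empty,
      ← PySem.Set.update_map_eq_foldl_add,
      PySem.Set.update_eq_append_filter, PySem.Set.update_eq_append_filter,
      PySem.Set.ofList_ofList, pvVisitedOfList cz x_hi lo h0]

-- parents: A's running-px pair fold equals B's closed-form fold
theorem pvParentsEq (c : Int → Bool) (b : Int) : ∀ (n : Nat) (a x : Int) (out : PySem.Set String),
    (a - b).toNat = n →
    ((PySem.List.pyRange a b (-1)).foldl
      (fun (st : Int × PySem.Set String) pz =>
        (PySem.Int.floordiv st.1 2,
         if c pz then PySem.Set.add st.2 (pvTileToPrefix pz (PySem.Int.floordiv st.1 2)) else st.2))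
      (x, out)).2
    = (PySem.List.pyRange a b (-1)).foldl
        (fun o pz =>
          if c pz then PySem.Set.add o (pvTileToPrefix pz (PySem.Int.floordiv x ((2 : Int) ^ (a + 1 - pz).toNat))) else o)
        out := by
  intro n
  induction n using Nat.strong_induction_on with
  | _ n ih =>
    intro a x out hm
    by_cases h : b < a
    · rw [PySem.List.pyRange_neg_one_cons h, List.foldl_cons, List.foldl_cons]
      rw [ih ((a - 1) - b).toNat (by omega) (a - 1) (PySem.Int.floordiv x 2) _ rfl]
      have hfirst : ((2 : Int) ^ ((a + 1 - a).toNat)) = 2 := by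
        rw [show a + 1 - a = (1 : Int) by ring]; norm_num
      rw [hfirst]
      have hdiv1 : PySem.Int.floordiv x 2 = x / 2 := PySem.Int.floordiv_eq_ediv_of_pos (by norm_num)
      rw [hdiv1]
      apply PySem.List.foldl_congr_mem
      intro acc pz hpz
      have hle : pz ≤ a - 1 := by
        rw [PySem.List.pyRange_neg_one] at hpz; simp at hpz; omega
      have hkey : PySem.Int.floordiv (x / 2) ((2 : Int) ^ (a - 1 + 1 - pz).toNat)
          = PySem.Int.floordiv x ((2 : Int) ^ (a + 1 - pz).toNat) := by
        rw [PySem.Int.floordiv_eq_ediv_of_pos (by positivity),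
            PySem.Int.floordiv_eq_ediv_of_pos (by positivity),
            Int.ediv_ediv_of_nonneg (by norm_num : (0 : Int) ≤ 2)]
        congr 1
        rw [show (a + 1 - pz).toNat = (a - 1 + 1 - pz).toNat + 1 by omega, pow_succ]
        ring
      rw [hkey]
    · rw [PySem.List.pyRange_neg_one_eq_nil (by omega), List.foldl_nil, List.foldl_nil]

theorem pvParentsEq' (c : Int → Bool) (b a x : Int) (out : PySem.Set String) :
    ((PySem.List.pyRange a b (-1)).foldl
      (fun (st : Int × PySem.Set String) pz =>
        (PySem.Int.floordiv st.1 2,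
         if c pz then PySem.Set.add st.2 (pvTileToPrefix pz (PySem.Int.floordiv st.1 2)) else st.2))
      (x, out)).2
    = (PySem.List.pyRange a b (-1)).foldl
        (fun o pz =>
          if c pz then PySem.Set.add o (pvTileToPrefix pz (PySem.Int.floordiv x ((2 : Int) ^ (a + 1 - pz).toNat))) else o)
        out :=
  pvParentsEq c b (a - b).toNat a x out rfl

-- ===== VERDICT (by name: the statement is the Claim_ definition above) =====
theorem expand_tile_prefixes_py_spec : Claim_equal_expand_tile_prefixes_py := by
  intro z x zs _ hx
  unfold Spec_expand_tile_prefixes_py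
  have hx' : (0 : Int) ≤ x := hx
  simp only [expand_tile_prefixes_py, expand_tile_prefixes_py_alt]
  split_ifs with h hz
  · rfl
  all_goals (
    rw [pvParentsEq']
    simp only [show ∀ pz : Int, z - 1 + 1 - pz = z - pz from fun pz => by ring]
    apply PySem.List.foldl_congr_mem
    intro acc cz _
    split_ifs with hc
    · have hnn : (0 : Int) ≤ x * (2 : Int) ^ (cz - z).toNat :=
        mul_nonneg hx' (by positivity)
      have hch := pvChildEq cz (x * (2 : Int) ^ (cz - z).toNat)
        (x * (2 : Int) ^ (cz - z).toNat + (2 : Int) ^ (cz - z).toNat - 1) hnn acc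
      rw [show x * (2 : Int) ^ (cz - z).toNat + (2 : Int) ^ (cz - z).toNat - 1 + 1
            = x * (2 : Int) ^ (cz - z).toNat + (2 : Int) ^ (cz - z).toNat from by ring] at hch
      exact hch
    · rfl)
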